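-- pv_equiv track=rewrite | github.com/Kilig947/Hello-GPT | webui_elem/func_signals.py | mask_to_chatbot
-- ===== SOURCE A (Python) =====
-- def mask_to_chatbot(data):
--     population = []
--     history = []
--     chatbot = []
--     for i, item in enumerate(data):
--         if i == 0:
--             item[0] = 'system'
--         elif i % 2 == 0:
--             item[0] = 'assistant'
--             history.append(item[1])
--         else:
--             item[0] = 'user'
--             history.append(item[1])
--         population.append(item)
--     for you, bot in zip(history[0::2], history[1::2]):
--         if not you: you = None
--         if not bot: bot = None
--         chatbot.append([you, bot])
--     return population, chatbot, history
-- ===== SOURCE B (Python) =====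
-- def mask_to_chatbot(data):
--     # Single pass: roles, history and chatbot pairs are built in one loop over
--     # enumerate(data), tracking the last user message instead of slicing/zipping
--     # history afterwards. Mutates the inner lists in place exactly as A does.
--     population = []
--     chatbot = []
--     history = []
--     you = None
--     for i, item in enumerate(data):
--         if i == 0:
--             item[0] = 'system'
--         elif i % 2 == 1:
--             item[0] = 'user'
--             you = item[1]
--             history.append(you)
--         else:
--             item[0] = 'assistant'
--             bot = item[1]
--             history.append(bot)
--             chatbot.append([you or None, bot or None])
--         population.append(item)
--     return population, chatbot, history
-- ===== Notes on version B (the rewrite author's own statement) =====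
-- stated objective: simpler
-- what changed: A tags roles in one loop, then builds chatbot pairs in a second pass by zipping the step-2 slices history[0::2] and history[1::2]; B does everything in one pass over enumerate(data), tracking the last user message and emitting a [user, assistant] pair at each assistant turn, so the slicing/zipping pass disappears.
import Mathlib
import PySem

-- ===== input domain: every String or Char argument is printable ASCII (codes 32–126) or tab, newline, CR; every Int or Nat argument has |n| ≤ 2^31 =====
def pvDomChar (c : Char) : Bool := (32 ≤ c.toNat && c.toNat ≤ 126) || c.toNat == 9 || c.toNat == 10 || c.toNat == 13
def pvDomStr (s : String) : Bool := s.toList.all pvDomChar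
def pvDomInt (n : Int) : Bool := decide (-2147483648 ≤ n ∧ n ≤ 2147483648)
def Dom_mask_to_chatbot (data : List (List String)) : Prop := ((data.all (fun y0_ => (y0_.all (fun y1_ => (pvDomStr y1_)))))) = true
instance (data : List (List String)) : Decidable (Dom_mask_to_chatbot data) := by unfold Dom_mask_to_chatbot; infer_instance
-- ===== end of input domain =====

-- B rebuilds the chatbot pairs in the SAME single pass that tags roles, tracking the
-- last user message, instead of A's second pass zipping two step-2 slices of history
-- (objective: simpler — one pass, no slicing). Both Pythons mutate the inner lists
-- (item[0] = role) identically; the theorems are about the returned value.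

-- 'x or None' / 'if not x: x = None' on a string: empty string becomes None
def pvOpt (s : String) : Option String := if s = "" then none else some s

-- ===== PORT A =====
-- the for-loop over enumerate(data): item[0] is assigned (List.set 0), item[1] read
def maskA_go : List (List String) → Nat → List (List String) × List String
  | [], _ => ([], [])
  | item :: rest, i =>
    if i = 0 then
      let (p, h) := maskA_go rest (i+1)
      (item.set 0 "system" :: p, h)
    else if i % 2 = 0 then
      let (p, h) := maskA_go rest (i+1)
      (item.set 0 "assistant" :: p, PySem.List.pyGetD item 1 "" :: h)
    else
      let (p, h) := maskA_go rest (i+1)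
      (item.set 0 "user" :: p, PySem.List.pyGetD item 1 "" :: h)

-- hand-port of the step-2 slice xs[0::2] (PySem has no lemma API for step 2);
-- exact: picks indices 0,2,4,…; xs[1::2] is sliceStep2 (xs.drop 1)
def sliceStep2 : List String → List String
  | [] => []
  | [a] => [a]
  | a :: _ :: t => a :: sliceStep2 t

def mask_to_chatbot (data : List (List String)) : List (List String) × List (List (Option String)) × List String :=
  let r := maskA_go data 0
  let population := r.1
  let history := r.2
  -- second pass: for you, bot in zip(history[0::2], history[1::2]) …
  let chatbot := ((sliceStep2 history).zip (sliceStep2 (history.drop 1))).map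
    (fun yb => [pvOpt yb.1, pvOpt yb.2])
  (population, chatbot, history)

-- ===== PORT B =====
-- single pass (Source B's loop as structural recursion): 'you' carries the last user message
def maskB_go : List (List String) → Nat → String → List (List String) × List (List (Option String)) × List String
  | [], _, _ => ([], [], [])
  | item :: rest, i, you =>
    if i = 0 then
      let (p, c, h) := maskB_go rest (i+1) you
      (item.set 0 "system" :: p, c, h)
    else if i % 2 = 1 then
      let v := PySem.List.pyGetD item 1 ""
      let (p, c, h) := maskB_go rest (i+1) v
      (item.set 0 "user" :: p, c, v :: h)
    else
      let v := PySem.List.pyGetD item 1 ""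
      let (p, c, h) := maskB_go rest (i+1) you
      (item.set 0 "assistant" :: p, [pvOpt you, pvOpt v] :: c, v :: h)

def mask_to_chatbot_alt (data : List (List String)) : List (List String) × List (List (Option String)) × List String :=
  maskB_go data 0 ""

-- ===== PRECONDITION & SPEC =====
-- Pre_ excludes exactly the inputs where Python A raises IndexError: an empty first
-- message (item[0] assignment) or a later message of length < 2 (item[1] read).
def Pre_mask_to_chatbot (data : List (List String)) : Prop :=
  (∀ it ∈ data.take 1, it ≠ []) ∧ ∀ it ∈ data.drop 1, 2 ≤ it.length
instance (data : List (List String)) : Decidable (Pre_mask_to_chatbot data) := by unfold Pre_mask_to_chatbot; infer_instance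

def pvWitness_mask_to_chatbot : List (List String) :=
  [["a", "hi"], ["b", "hello"], ["c", ""], ["d", "again"]]

def Spec_mask_to_chatbot (data : List (List String)) (out : List (List String) × List (List (Option String)) × List String) : Prop := out = mask_to_chatbot_alt data
instance (data : List (List String)) (out : List (List String) × List (List (Option String)) × List String) : Decidable (Spec_mask_to_chatbot data out) := by unfold Spec_mask_to_chatbot; infer_instance

-- ===== CLAIM (what is proved, stated in full; the proofs are below) =====
def Claim_equal_mask_to_chatbot : Prop := ∀ (data : List (List String)), Dom_mask_to_chatbot data → Pre_mask_to_chatbot data → Spec_mask_to_chatbot data (mask_to_chatbot data)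

-- ===== LEMMAS AND PROOFS =====

-- A's second pass, as a function of the history list
def chatOf (h : List String) : List (List (Option String)) :=
  ((sliceStep2 h).zip (sliceStep2 (h.drop 1))).map (fun yb => [pvOpt yb.1, pvOpt yb.2])

theorem chatOf_nil : chatOf [] = [] := rfl
theorem chatOf_single (a : String) : chatOf [a] = [] := rfl
theorem chatOf_cons_cons (a b : String) (t : List String) :
    chatOf (a :: b :: t) = [pvOpt a, pvOpt b] :: chatOf t := by
  cases t with
  | nil => rfl
  | cons c t' => simp [chatOf, sliceStep2]

-- invariant of the merged loop: from position i ≥ 1, B's chatbot is A's second pass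
-- applied to the remaining history (with the pending 'you' prepended at even i)
theorem go_rel (data : List (List String)) :
    ∀ i you, 1 ≤ i →
      maskB_go data i you =
        ((maskA_go data i).1,
         (if i % 2 = 1 then chatOf (maskA_go data i).2 else chatOf (you :: (maskA_go data i).2)),
         (maskA_go data i).2) := by
  induction data with
  | nil =>
      intro i you hi
      simp [maskA_go, maskB_go]
      split <;> simp [chatOf_nil, chatOf_single]
  | cons item rest ih =>
      intro i you hi
      have hi0 : ¬ i = 0 := by omega
      rcases Nat.even_or_odd i with he | ho
      · -- i even (and ≥ 2): assistant turn
        have h2 : i % 2 = 0 := Nat.even_iff.mp he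
        have h2' : (i+1) % 2 = 1 := by omega
        simp only [maskA_go, maskB_go, hi0, if_false, h2, if_true]
        rw [ih (i+1) you (by omega)]
        simp [h2', chatOf_cons_cons]
      · -- i odd: user turn
        have h2 : i % 2 = 1 := Nat.odd_iff.mp ho
        have h2' : ¬ ((i+1) % 2 = 1) := by omega
        simp only [maskA_go, maskB_go, hi0, if_false, h2]
        rw [ih (i+1) (PySem.List.pyGetD item 1 "") (by omega)]
        simp [h2']

-- ===== VERDICT (by name: the statement is the Claim_ definition above) =====
theorem mask_to_chatbot_spec : Claim_equal_mask_to_chatbot := by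
  intro data _ _
  unfold Spec_mask_to_chatbot mask_to_chatbot mask_to_chatbot_alt
  cases data with
  | nil => rfl
  | cons item rest =>
      simp only [maskA_go, maskB_go]
      rw [go_rel rest 1 "" (by omega)]
      simp [chatOf]
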